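-- pv_equiv track=rewrite | github.com/BrunoLSA/DojoPuzzles | lampadas_no_corredor.py | lampada
-- ===== SOURCE A (Python) =====
-- def lampada(n):
--     status = (n+1)*["off"]
--     for i in range(1, n+1):
--         for a in range(1, n+1):
--             if a % i == 0 and status[a] == "on":
--                 status[a] = "off"
--             elif a % i == 0 and status[a] == "off":
--                 status[a] = "on"
--             else:
--                 pass
--     del status[0]
--     return status
-- ===== SOURCE B (Python) =====
-- def lampada(n):
--     # Bulb a ends "on" iff a has an odd number of divisors, i.e. iff a is a perfect square.
--     status = ["off"] * n
--     k = 1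
--     while k * k <= n:
--         status[k * k - 1] = "on"
--         k += 1
--     return status
-- ===== Notes on version B (the rewrite author's own statement) =====
-- stated objective: faster
-- what changed: Replaced the O(n^2) double loop that toggles every bulb once per divisor by the closed-form fact that a bulb stays on iff its number is a perfect square, so B just writes 'on' at the O(sqrt n) square positions of an 'off' list.
import Mathlib
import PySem

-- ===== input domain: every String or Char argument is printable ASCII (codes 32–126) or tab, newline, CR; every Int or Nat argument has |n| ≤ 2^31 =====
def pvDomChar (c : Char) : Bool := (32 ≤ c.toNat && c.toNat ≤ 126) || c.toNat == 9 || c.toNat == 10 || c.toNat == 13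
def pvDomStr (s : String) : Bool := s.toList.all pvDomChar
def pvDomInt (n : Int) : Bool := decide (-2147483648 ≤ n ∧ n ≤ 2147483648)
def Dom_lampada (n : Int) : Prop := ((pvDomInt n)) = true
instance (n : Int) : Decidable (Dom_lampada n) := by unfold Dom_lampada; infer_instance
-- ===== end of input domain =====

-- B replaces A's quadratic toggle-per-divisor double loop by writing "on" exactly at the perfect
-- square positions of an all-"off" list (objective: faster).

-- ===== PORT A =====
def lampadaAStep (i : Int) (st : List String) (a : Int) : List String :=
  if PySem.Int.mod a i == 0 && PySem.List.pyGetD st a "" == "on" then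
    PySem.List.pySetD st a "off"
  else if PySem.Int.mod a i == 0 && PySem.List.pyGetD st a "" == "off" then
    PySem.List.pySetD st a "on"
  else st

def lampada (n : Int) : List String :=
  let status := List.replicate (n + 1).toNat "off"
  let status := (PySem.List.pyRange 1 (n + 1) 1).foldl (fun st i =>
    (PySem.List.pyRange 1 (n + 1) 1).foldl (lampadaAStep i) st) status
  -- the 'del' of the first entry (raises IndexError when status is empty; Pre_lampada excludes that)
  status.tail

-- ===== PORT B =====
def lampadaAltGo (n : Int) (fuel k : Nat) (st : List String) : List String :=
  match fuel with
  | 0 => st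
  | f + 1 =>
    if ((k * k : Nat) : Int) ≤ n then
      lampadaAltGo n f (k + 1) (PySem.List.pySetD st (((k * k : Nat) : Int) - 1) "on")
    else st

def lampada_alt (n : Int) : List String :=
  -- Source B's 'while k*k <= n' runs at most n.toNat times (k*k ≤ n forces k ≤ n), so this fuel suffices
  lampadaAltGo n (n.toNat + 1) 1 (List.replicate n.toNat "off")

-- ===== PRECONDITION & SPEC =====
-- Pre_ excludes negative n, where A raises IndexError: its final 'del' finds nothing to delete.
def Pre_lampada (n : Int) : Prop := 0 ≤ n
instance (n : Int) : Decidable (Pre_lampada n) := by unfold Pre_lampada; infer_instance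
def pvWitness_lampada : Int := (4)

def Spec_lampada (n : Int) (out : List String) : Prop := out = lampada_alt n
instance (n : Int) (out : List String) : Decidable (Spec_lampada n out) := by unfold Spec_lampada; infer_instance

-- ===== CLAIM (what is proved, stated in full; the proofs are below) =====
def Claim_equal_lampada : Prop := ∀ (n : Int), Dom_lampada n → Pre_lampada n → Spec_lampada n (lampada n)

-- ===== LEMMAS AND PROOFS =====

-- ---- generic helpers ----

/-- Setting an element of a `map` over `range` just updates the generating function. -/
theorem mapRange_set (N : Nat) (f : Nat → String) (j : Nat) (v : String) :
    ((List.range N).map f).set j v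
      = (List.range N).map (fun p => if p = j then v else f p) := by
  apply List.ext_getElem
  · simp
  · intro i h1 h2
    simp at h1
    rw [List.getElem_set]
    simp only [List.getElem_map, List.getElem_range]
    by_cases hij : j = i
    · simp [hij]
    · simp [hij, Ne.symm hij]

/-- Parity of the size of a finite set carrying an involution = parity of its fixed points. -/
theorem parity_invol {α : Type} [DecidableEq α] (N : Nat) :
    ∀ (s : Finset α), s.card = N → ∀ (f : α → α), (∀ x ∈ s, f x ∈ s) → (∀ x ∈ s, f (f x) = x) →
      s.card % 2 = ({x ∈ s | f x = x}).card % 2 := by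
  induction N using Nat.strong_induction_on with
  | _ N IH =>
    intro s hcard f hmem hinv
    by_cases hall : ∀ x ∈ s, f x = x
    · have : {x ∈ s | f x = x} = s := by
        apply Finset.filter_true_of_mem hall
      rw [this]
    · push_neg at hall
      obtain ⟨x, hx, hfx⟩ := hall
      have hfxs : f x ∈ s := hmem x hx
      set s' := s \ {x, f x} with hs'
      have hxne : x ≠ f x := fun h => hfx h.symm
      have hsub : ({x, f x} : Finset α) ⊆ s := by
        intro y hy
        simp only [Finset.mem_insert, Finset.mem_singleton] at hy
        rcases hy with h | h <;> simp [h, hx, hfxs]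
      have hcard' : s'.card = s.card - 2 := by
        rw [hs', Finset.card_sdiff, Finset.inter_eq_left.mpr hsub, Finset.card_pair hxne]
      have hub : 2 ≤ s.card := by
        calc 2 = ({x, f x} : Finset α).card := (Finset.card_pair hxne).symm
        _ ≤ s.card := Finset.card_le_card hsub
      have hmem' : ∀ y ∈ s', f y ∈ s' := by
        intro y hy
        rw [hs', Finset.mem_sdiff] at hy ⊢
        obtain ⟨hys, hyn⟩ := hy
        simp only [Finset.mem_insert, Finset.mem_singleton] at hyn
        push_neg at hyn
        refine ⟨hmem y hys, ?_⟩
        simp only [Finset.mem_insert, Finset.mem_singleton]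
        push_neg
        constructor
        · intro h
          exact hyn.2 (by rw [← hinv y hys, h])
        · intro h
          apply hyn.1
          have := congrArg f h
          rw [hinv y hys, hinv x hx] at this
          exact this
      have hinv' : ∀ y ∈ s', f (f y) = y := by
        intro y hy
        rw [hs', Finset.mem_sdiff] at hy
        exact hinv y hy.1
      have hfix : {y ∈ s' | f y = y} = {y ∈ s | f y = y} := by
        apply Finset.ext
        intro y
        simp only [Finset.mem_filter, hs', Finset.mem_sdiff, Finset.mem_insert,
          Finset.mem_singleton]
        constructor
        · rintro ⟨⟨h1, _⟩, h3⟩; exact ⟨h1, h3⟩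
        · rintro ⟨h1, h2⟩
          refine ⟨⟨h1, ?_⟩, h2⟩
          push_neg
          constructor
          · rintro rfl; exact hfx h2
          · rintro rfl
            rw [hinv x hx] at h2
            exact hfx h2.symm
      have hlt : s'.card < N := by omega
      have := IH s'.card hlt s' rfl f hmem' hinv'
      rw [hfix] at this
      omega

/-- A positive number has an odd number of divisors iff it is a perfect square. -/
theorem card_divisors_odd_iff (a : Nat) (ha : a ≠ 0) :
    Odd a.divisors.card ↔ Nat.sqrt a * Nat.sqrt a = a := by
  have hmem : ∀ d ∈ a.divisors, a / d ∈ a.divisors := by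
    intro d hd
    rw [Nat.mem_divisors] at hd ⊢
    exact ⟨Nat.div_dvd_of_dvd hd.1, ha⟩
  have hinv : ∀ d ∈ a.divisors, a / (a / d) = d := by
    intro d hd
    rw [Nat.mem_divisors] at hd
    exact Nat.div_div_self hd.1 ha
  have hpar := parity_invol a.divisors.card a.divisors rfl (fun d => a / d) hmem hinv
  have hfix : {d ∈ a.divisors | a / d = d} =
      if Nat.sqrt a * Nat.sqrt a = a then {Nat.sqrt a} else ∅ := by
    ext d
    simp only [Finset.mem_filter, Nat.mem_divisors]
    split_ifs with hsq
    · simp only [Finset.mem_singleton]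
      constructor
      · rintro ⟨⟨hd, _⟩, hdiv⟩
        have hdd : d * d = a := by
          conv_rhs => rw [← Nat.div_mul_cancel hd]
          rw [hdiv]
        have := hdd.trans hsq.symm
        exact (Nat.mul_self_inj).mp this
      · rintro rfl
        have h0 : Nat.sqrt a ≠ 0 := by
          intro h; rw [h] at hsq; simp at hsq; exact ha hsq.symm
        refine ⟨⟨Dvd.intro _ hsq, ha⟩, ?_⟩
        exact (Nat.div_eq_iff_eq_mul_left (Nat.pos_of_ne_zero h0)
          (Dvd.intro _ hsq)).mpr hsq.symm
    · simp only [Finset.notMem_empty, iff_false]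
      rintro ⟨⟨hd, _⟩, hdiv⟩
      apply hsq
      have hdd : d * d = a := by
        conv_rhs => rw [← Nat.div_mul_cancel hd]
        rw [hdiv]
      rw [← hdd, Nat.sqrt_eq, hdd]
  rw [hfix] at hpar
  rw [Nat.odd_iff, hpar]
  split_ifs with hsq
  · simp [hsq]
  · simp [hsq]

-- ---- A-side: the double loop toggles bulb a once per divisor i ----

def stateList (m : Nat) (b : Nat → Bool) : List String :=
  (List.range (m + 1)).map (fun p => if b p then "on" else "off")

def divCnt (j p : Nat) : Nat := ((Finset.Icc 1 j).filter (fun d => d ∣ p)).card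

theorem stateList_congr (m : Nat) (b b' : Nat → Bool) (h : ∀ p, p ≤ m → b p = b' p) :
    stateList m b = stateList m b' := by
  unfold stateList
  refine List.map_congr_left ?_
  intro p hp
  rw [List.mem_range] at hp
  rw [h p (by omega)]

theorem getD_stateList (m : Nat) (b : Nat → Bool) (a : Int) (h0 : 0 ≤ a) (h1 : a ≤ (m : Int)) :
    PySem.List.pyGetD (stateList m b) a "" = if b a.toNat then "on" else "off" := by
  rw [PySem.List.pyGetD_of_nonneg _ _ h0]
  unfold stateList
  have hlt : a.toNat < m + 1 := by omega
  simp [List.getD, List.getElem?_map, List.getElem?_range, hlt]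

theorem step_stateList (m : Nat) (b : Nat → Bool) (i a : Int) (ha : 1 ≤ a) (ham : a ≤ (m : Int)) :
    lampadaAStep i (stateList m b) a
      = stateList m (fun p => if (p : Int) = a ∧ i ∣ a then !b p else b p) := by
  unfold lampadaAStep
  rw [getD_stateList m b a (by omega) ham]
  by_cases hdvd : i ∣ a
  · have hm : PySem.Int.mod a i = 0 := (PySem.Int.mod_eq_zero_iff_dvd a i).mpr hdvd
    by_cases hb : b a.toNat
    · rw [if_pos (by simp [hm, hb])]
      rw [PySem.List.pySetD_of_nonneg _ _ (by omega : (0:Int) ≤ a)]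
      unfold stateList
      rw [mapRange_set]
      refine List.map_congr_left ?_
      intro p hp
      rw [List.mem_range] at hp
      by_cases hpa : p = a.toNat
      · have : (p : Int) = a := by omega
        simp [hpa, this, hdvd, hb]
        omega
      · have : ¬((p : Int) = a) := by omega
        simp [hpa, this]
    · rw [if_neg (by simp [hb]), if_pos (by simp [hm, hb])]
      rw [PySem.List.pySetD_of_nonneg _ _ (by omega : (0:Int) ≤ a)]
      unfold stateList
      rw [mapRange_set]
      refine List.map_congr_left ?_
      intro p hp
      rw [List.mem_range] at hp
      by_cases hpa : p = a.toNat
      · have : (p : Int) = a := by omega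
        simp [hpa, this, hdvd, hb]
        omega
      · have : ¬((p : Int) = a) := by omega
        simp [hpa, this]
  · have hm : ¬(PySem.Int.mod a i = 0) := fun h => hdvd ((PySem.Int.mod_eq_zero_iff_dvd a i).mp h)
    rw [if_neg (by simp [hm]), if_neg (by simp [hm])]
    unfold stateList
    refine (List.map_congr_left ?_).symm
    intro p hp
    simp [hdvd]

theorem inner_spec (m : Nat) (i : Int) :
    ∀ (t : Nat) (a₀ : Int) (b : Nat → Bool), 1 ≤ a₀ → ((m : Int) + 1 - a₀).toNat = t →
      (PySem.List.pyRange a₀ ((m : Int) + 1) 1).foldl (lampadaAStep i) (stateList m b)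
        = stateList m (fun p => if a₀ ≤ (p : Int) ∧ i ∣ (p : Int) then !b p else b p) := by
  intro t
  induction t with
  | zero =>
    intro a₀ b h1 h2
    rw [PySem.List.pyRange_one_eq_nil (by omega), List.foldl_nil]
    apply stateList_congr
    intro p hp
    have : ¬(a₀ ≤ (p : Int)) := by omega
    simp [this]
  | succ t IH =>
    intro a₀ b h1 h2
    rw [PySem.List.pyRange_one_cons (by omega), List.foldl_cons]
    rw [step_stateList m b i a₀ h1 (by omega)]
    rw [IH (a₀ + 1) _ (by omega) (by omega)]
    apply stateList_congr
    intro p hp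
    by_cases hpa : (p : Int) = a₀
    · have hn : ¬(a₀ + 1 ≤ (p : Int)) := by omega
      have hy : a₀ ≤ (p : Int) := by omega
      by_cases hd : i ∣ (p : Int)
      · simp [hn, hy, hpa, hd, hpa ▸ hd]
      · have : ¬(i ∣ a₀) := by rw [← hpa]; exact hd
        simp [hn, hy, hpa, hd, this]
    · have he : (a₀ + 1 ≤ (p : Int)) ↔ (a₀ ≤ (p : Int)) := by omega
      have hc : ¬((p : Int) = a₀ ∧ i ∣ a₀) := fun h => hpa h.1
      simp only [if_neg hc, he]

theorem divCnt_succ (j p : Nat) :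
    divCnt (j + 1) p = divCnt j p + (if (j + 1) ∣ p then 1 else 0) := by
  unfold divCnt
  have h : Finset.Icc 1 (j + 1) = insert (j + 1) (Finset.Icc 1 j) := by
    ext d
    simp [Finset.mem_Icc, Finset.mem_insert]
    omega
  rw [h, Finset.filter_insert]
  split_ifs with hd
  · rw [Finset.card_insert_of_notMem (by simp [Finset.mem_filter, Finset.mem_Icc])]
  · simp

theorem outer_spec (m : Nat) (j : Nat) :
    (PySem.List.pyRange 1 ((j : Int) + 1) 1).foldl (fun st i =>
        (PySem.List.pyRange 1 ((m : Int) + 1) 1).foldl (lampadaAStep i) st)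
      (stateList m (fun _ => false))
      = stateList m (fun p => if p = 0 then false else decide (Odd (divCnt j p))) := by
  induction j with
  | zero =>
    have h0 : PySem.List.pyRange 1 (((0 : Nat) : Int) + 1) 1 = [] :=
      PySem.List.pyRange_one_eq_nil (by norm_num)
    rw [h0, List.foldl_nil]
    apply stateList_congr
    intro p hp
    have : divCnt 0 p = 0 := by
      unfold divCnt
      simp
    simp [this]
  | succ j IH =>
    have houter : PySem.List.pyRange 1 (((j + 1 : Nat) : Int) + 1) 1
        = PySem.List.pyRange 1 ((j : Int) + 1) 1 ++ [(j : Int) + 1] := by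
      have hsplit : ((j + 1 : Nat) : Int) + 1 = ((j : Int) + 1) + 1 := by push_cast; ring
      rw [hsplit]
      exact PySem.List.pyRange_one_succ_right (by omega)
    rw [houter, List.foldl_append, List.foldl_cons, List.foldl_nil, IH]
    rw [inner_spec m ((j : Int) + 1) m 1 _ (by omega) (by omega)]
    apply stateList_congr
    intro p hp
    by_cases hp0 : p = 0
    · have : ¬((1 : Int) ≤ (p : Int)) := by omega
      simp [hp0]
    · have h1 : (1 : Int) ≤ (p : Int) := by omega
      have hdc : ((j : Int) + 1) ∣ (p : Int) ↔ (j + 1) ∣ p := by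
        constructor
        · intro h
          have : ((j + 1 : Nat) : Int) ∣ (p : Int) := by push_cast; exact_mod_cast h
          exact_mod_cast this
        · intro h
          have : ((j + 1 : Nat) : Int) ∣ ((p : Nat) : Int) := Int.natCast_dvd_natCast.mpr h
          push_cast at this
          exact this
      rw [divCnt_succ]
      by_cases hd : (j + 1) ∣ p
      · have hdi : ((j : Int) + 1) ∣ (p : Int) := hdc.mpr hd
        simp only [hp0, if_false, h1, hdi, and_true, if_true, if_pos hd]
        simp only [Nat.odd_iff]
        rcases Nat.mod_two_eq_zero_or_one (divCnt j p) with h | h <;>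
          simp [h, Nat.add_mod]
      · have hdi : ¬(((j : Int) + 1) ∣ (p : Int)) := fun h => hd (hdc.mp h)
        simp [hp0, hdi, hd]

theorem lampada_eq (n : Int) (hn : 0 ≤ n) :
    lampada n = (List.range n.toNat).map
      (fun p => if Odd (divCnt n.toNat (p + 1)) then "on" else "off") := by
  have hnm : n = ((n.toNat : Nat) : Int) := by omega
  dsimp only [lampada]
  have hrep : List.replicate (n + 1).toNat "off" = stateList n.toNat (fun _ => false) := by
    unfold stateList
    simp only [Bool.false_eq_true, if_false, List.map_const', List.length_range]
    congr 1
    omega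
  rw [hrep]
  rw [show n + 1 = ((n.toNat : Nat) : Int) + 1 from by omega]
  rw [outer_spec n.toNat n.toNat]
  unfold stateList
  rw [List.range_succ_eq_map, List.map_cons, List.tail_cons, List.map_map]
  refine List.map_congr_left ?_
  intro p hp
  simp [Nat.succ_eq_add_one]

-- ---- B-side: writing "on" at the squares ----

theorem go_getElem? (n : Int) :
    ∀ (fuel k : Nat) (st : List String), 1 ≤ k → n.toNat + 1 ≤ fuel + k → st.length = n.toNat →
      ∀ (p : Nat),
      (lampadaAltGo n fuel k st)[p]?
        = if k ≤ Nat.sqrt (p + 1) ∧ Nat.sqrt (p + 1) * Nat.sqrt (p + 1) = p + 1 ∧ p < st.length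
          then some "on" else st[p]? := by
  intro fuel
  induction fuel with
  | zero =>
    intro k st hk hfuel hlen p
    have hcond : ¬(k ≤ Nat.sqrt (p + 1) ∧ Nat.sqrt (p + 1) * Nat.sqrt (p + 1) = p + 1
        ∧ p < st.length) := by
      rintro ⟨h1, h2, h3⟩
      have h4 : k * k ≤ Nat.sqrt (p + 1) * Nat.sqrt (p + 1) := Nat.mul_le_mul h1 h1
      have h5 : k ≤ k * k := Nat.le_mul_of_pos_left k (by omega)
      omega
    rw [if_neg hcond]
    rfl
  | succ f IH =>
    intro k st hk hfuel hlen p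
    unfold lampadaAltGo
    by_cases hguard : ((k * k : Nat) : Int) ≤ n
    · rw [if_pos hguard]
      have hkk1 : 1 ≤ k * k := Nat.mul_pos (by omega) (by omega)
      have hkkn : k * k ≤ n.toNat := by omega
      have hset : PySem.List.pySetD st (((k * k : Nat) : Int) - 1) "on"
          = st.set (k * k - 1) "on" := by
        rw [show ((k * k : Nat) : Int) - 1 = (((k * k - 1 : Nat) : Nat) : Int) from by omega,
          PySem.List.pySetD_natCast]
      rw [hset]
      rw [IH (k + 1) _ (by omega) (by omega) (by simpa using hlen) p]
      rw [List.length_set, List.getElem?_set]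
      by_cases hpk : p = k * k - 1
      · have hpk1 : p + 1 = k * k := by omega
        have hsq : Nat.sqrt (p + 1) = k := by rw [hpk1, Nat.sqrt_eq]
        have hplen : p < st.length := by omega
        have hA : ¬(k + 1 ≤ Nat.sqrt (p + 1) ∧ Nat.sqrt (p + 1) * Nat.sqrt (p + 1)
            = p + 1 ∧ p < st.length) := by rintro ⟨h1, _, _⟩; omega
        rw [if_neg hA]
        rw [if_pos (show k * k - 1 = p by omega)]
        rw [if_pos (show k * k - 1 < st.length by omega)]
        rw [if_pos (show k ≤ Nat.sqrt (p + 1) ∧ Nat.sqrt (p + 1) * Nat.sqrt (p + 1)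
            = p + 1 ∧ p < st.length from ⟨by omega, by rw [hsq]; omega, hplen⟩)]
      · rw [if_neg (show ¬(k * k - 1 = p) by omega)]
        have hiff : (k + 1 ≤ Nat.sqrt (p + 1) ∧ Nat.sqrt (p + 1) * Nat.sqrt (p + 1)
              = p + 1 ∧ p < st.length)
            ↔ (k ≤ Nat.sqrt (p + 1) ∧ Nat.sqrt (p + 1) * Nat.sqrt (p + 1)
              = p + 1 ∧ p < st.length) := by
          constructor
          · rintro ⟨h1, h2, h3⟩; exact ⟨by omega, h2, h3⟩
          · rintro ⟨h1, h2, h3⟩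
            refine ⟨?_, h2, h3⟩
            rcases Nat.eq_or_lt_of_le h1 with heq | hlt
            · exfalso; apply hpk; rw [← heq] at h2; omega
            · omega
        rw [if_congr hiff rfl rfl]
    · rw [if_neg hguard]
      have hcond : ¬(k ≤ Nat.sqrt (p + 1) ∧ Nat.sqrt (p + 1) * Nat.sqrt (p + 1) = p + 1
          ∧ p < st.length) := by
        rintro ⟨h1, h2, h3⟩
        have h4 : k * k ≤ Nat.sqrt (p + 1) * Nat.sqrt (p + 1) := Nat.mul_le_mul h1 h1
        omega
      rw [if_neg hcond]

theorem lampada_alt_eq (n : Int) :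
    lampada_alt n = (List.range n.toNat).map
      (fun p => if Nat.sqrt (p + 1) * Nat.sqrt (p + 1) = p + 1 then "on" else "off") := by
  unfold lampada_alt
  apply List.ext_getElem?
  intro p
  rw [go_getElem? n (n.toNat + 1) 1 _ (by omega) (by omega) (by simp) p]
  rw [List.length_replicate]
  have hs1 : 1 ≤ Nat.sqrt (p + 1) := Nat.sqrt_pos.mpr (by omega)
  by_cases hp : p < n.toNat
  · by_cases hsq : Nat.sqrt (p + 1) * Nat.sqrt (p + 1) = p + 1
    · rw [if_pos ⟨hs1, hsq, hp⟩]
      simp [hp, hsq]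
    · rw [if_neg (fun h => hsq h.2.1)]
      simp [hp, hsq]
  · rw [if_neg (fun h => hp h.2.2)]
    simp [hp]

theorem divCnt_eq_card_divisors (m a : Nat) (ha : 1 ≤ a) (ham : a ≤ m) :
    divCnt m a = a.divisors.card := by
  unfold divCnt
  congr 1
  ext d
  simp only [Finset.mem_filter, Finset.mem_Icc, Nat.mem_divisors]
  constructor
  · rintro ⟨⟨h1, h2⟩, h3⟩; exact ⟨h3, by omega⟩
  · rintro ⟨h1, h2⟩
    have hd1 : 1 ≤ d := Nat.pos_of_dvd_of_pos h1 (by omega)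
    have hda : d ≤ a := Nat.le_of_dvd (by omega) h1
    exact ⟨⟨hd1, by omega⟩, h1⟩

-- ===== VERDICT (by name: the statement is the Claim_ definition above) =====
theorem lampada_spec : Claim_equal_lampada := by
  intro n _ hn
  unfold Spec_lampada
  rw [lampada_eq n hn, lampada_alt_eq n]
  refine List.map_congr_left ?_
  intro p hp
  rw [List.mem_range] at hp
  have h1 : divCnt n.toNat (p + 1) = (p + 1).divisors.card :=
    divCnt_eq_card_divisors n.toNat (p + 1) (by omega) (by omega)
  have h2 := card_divisors_odd_iff (p + 1) (by omega)
  rw [h1]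
  by_cases h : Odd ((p + 1).divisors.card)
  · rw [if_pos h, if_pos (h2.mp h)]
  · rw [if_neg h, if_neg (fun hc => h (h2.mpr hc))]
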